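-- pv_equiv track=rewrite | github.com/JoeJeffrey/AoC_2023 | DAY_7/day_7.py | get_groups_2
-- ===== SOURCE A (Python) =====
-- def get_groups_1(cards): #returns group structure
--     cards = list(cards)
--     cards = sorted(cards)
--     groups = [len([card for x in cards if x == card]) for card in set(cards)]
--     groups = sorted(groups,reverse= True)
--     return groups
--
-- def get_groups_2(cards):
--     Jokers = len([x for x in cards if x=='J'])
--     remaining = [x for x in cards if x!='J']
--     group = get_groups_1(remaining)
--     if group == []:
--         group = [0]
--     group[0]+=Jokers
--     return group
-- ===== SOURCE B (Python) =====
-- def get_groups_2(cards):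
--     rest = sorted(c for c in cards if c != 'J')
--     jokers = len(cards) - len(rest)
--     runs = []  # (char, run length) pairs, most recent run first
--     for c in rest:
--         if runs and runs[0][0] == c:
--             runs[0] = (c, runs[0][1] + 1)
--         else:
--             runs.insert(0, (c, 1))
--     sizes = sorted((n for _, n in runs), reverse=True)
--     if not sizes:
--         sizes = [0]
--     sizes[0] += jokers
--     return sizes
-- ===== Notes on version B (the rewrite author's own statement) =====
-- stated objective: alternative
-- what changed: Replaces per-distinct-value counting over set(cards) with a single run-length pass over the sorted non-joker cards (consecutive-equal runs collected in one scan), with jokers obtained as a length difference.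
import Mathlib
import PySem

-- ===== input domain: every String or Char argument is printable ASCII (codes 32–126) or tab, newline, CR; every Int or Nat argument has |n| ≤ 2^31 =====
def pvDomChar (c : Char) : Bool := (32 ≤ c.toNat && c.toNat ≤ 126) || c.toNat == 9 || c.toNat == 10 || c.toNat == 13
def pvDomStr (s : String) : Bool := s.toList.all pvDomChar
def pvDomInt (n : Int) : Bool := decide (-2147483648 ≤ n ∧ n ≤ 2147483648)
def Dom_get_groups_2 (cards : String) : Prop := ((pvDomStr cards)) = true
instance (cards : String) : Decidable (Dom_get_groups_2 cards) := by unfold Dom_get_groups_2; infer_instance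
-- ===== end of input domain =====

-- B replaces per-distinct-value counting over set(cards) by one run-length pass over the sorted non-joker cards.

-- ===== PORT A =====
def get_groups_1 (cards0 : List Char) : List Int :=
  let cards := PySem.List.sorted cards0 (fun x => x) false
  let groups := (PySem.Set.ofList cards).map
    (fun card => ((cards.filter (fun x => x == card)).length : Int))
  PySem.List.sorted groups (fun x => x) true

def get_groups_2 (cards : String) : List Int :=
  let jokers : Int := ((cards.toList.filter (fun x => x == 'J')).length : Int)
  let remaining := cards.toList.filter (fun x => x != 'J')
  let group := get_groups_1 remaining
  let group := if group = [] then [(0 : Int)] else group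
  match group with
  | [] => []          -- unreachable: group is nonempty here
  | g :: t => (g + jokers) :: t

-- ===== PORT B =====
-- one step of the run-length loop: extend the most recent run or start a new one
def altStep (runs : List (Char × Int)) (c : Char) : List (Char × Int) :=
  match runs with
  | (c', n) :: rs => if c' == c then (c, n + 1) :: rs else (c, 1) :: (c', n) :: rs
  | [] => [(c, 1)]

def get_groups_2_alt (cards : String) : List Int :=
  let rest := PySem.List.sorted (cards.toList.filter (fun c => c != 'J')) (fun x => x) false
  let jokers : Int := (cards.toList.length : Int) - (rest.length : Int)
  let runs := rest.foldl altStep []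
  let sizes := PySem.List.sorted (runs.map Prod.snd) (fun x => x) true
  let sizes := if sizes = [] then [(0 : Int)] else sizes
  match sizes with
  | [] => []          -- unreachable: sizes is nonempty here
  | g :: t => (g + jokers) :: t

-- ===== PRECONDITION & SPEC =====
def Spec_get_groups_2 (cards : String) (out : List Int) : Prop := out = get_groups_2_alt cards
instance (cards : String) (out : List Int) : Decidable (Spec_get_groups_2 cards out) := by unfold Spec_get_groups_2; infer_instance

-- ===== CLAIM (what is proved, stated in full; the proofs are below) =====
def Claim_equal_get_groups_2 : Prop := ∀ (cards : String), Dom_get_groups_2 cards → Spec_get_groups_2 cards (get_groups_2 cards)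


-- ===== LEMMAS AND PROOFS =====

-- descending sort of Ints is determined by the multiset of elements
theorem revSortDet (xs ys : List Int) (h : xs.Perm ys) :
    PySem.List.sorted xs (fun x => x) true = PySem.List.sorted ys (fun x => x) true := by
  have h1 := PySem.List.sorted_pairwise_rev xs (fun x => x)
  have h2 := PySem.List.sorted_pairwise_rev ys (fun x => x)
  have hp : (PySem.List.sorted xs (fun x => x) true).reverse.Perm
      (PySem.List.sorted ys (fun x => x) true).reverse := by
    refine (List.reverse_perm _).trans (((PySem.List.sorted_perm xs _ true).trans
      (h.trans (PySem.List.sorted_perm ys _ true).symm)).trans (List.reverse_perm _).symm)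
  have := PySem.List.eq_of_perm_of_pairwise_le_of_injective (fun x : Int => x)
    (fun a b hab => hab) hp (List.pairwise_reverse.mpr h1) (List.pairwise_reverse.mpr h2)
  exact List.reverse_injective this

-- the runs buried below the most recent one are never touched again
theorem foldl_altStep_cons : ∀ (s : List Char) (r : Char × Int) (rs : List (Char × Int)),
    s.foldl altStep (r :: rs) = s.foldl altStep [r] ++ rs
  | [], _, _ => rfl
  | c :: t, (c', n), rs => by
    simp only [List.foldl_cons, altStep]
    by_cases h : c' = c
    · simp only [h, BEq.rfl, if_true]
      exact foldl_altStep_cons t (c, n + 1) rs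
    · have hb : (c' == c) = false := by simp [h]
      simp only [hb, Bool.false_eq_true, if_false]
      rw [foldl_altStep_cons t (c, 1) ((c', n) :: rs), foldl_altStep_cons t (c, 1) [(c', n)]]
      simp

-- block decomposition: the loop absorbs the leading run of c's, then starts afresh
theorem foldl_altStep_block : ∀ (t : List Char) (c : Char) (n : Int),
    t.foldl altStep [(c, n)]
      = (t.dropWhile (· == c)).foldl altStep []
          ++ [(c, n + (((t.takeWhile (· == c)).length : Int)))]
  | [], c, n => by simp
  | d :: t', c, n => by
    simp only [List.foldl_cons]
    by_cases h : c = d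
    · subst h
      rw [show altStep [(c, n)] c = [(c, n + 1)] from by simp [altStep],
          List.dropWhile_cons_of_pos (by simp), List.takeWhile_cons_of_pos (by simp)]
      have harith : n + 1 + ((List.takeWhile (· == c) t').length : Int)
          = n + (((c :: List.takeWhile (· == c) t').length : Int)) := by
        simp only [List.length_cons]; push_cast; ring
      rw [foldl_altStep_block t' c (n + 1), harith]
    · have hb : (d == c) = false := by simpa using Ne.symm h
      have hb2 : (c == d) = false := by simpa using h
      rw [show altStep [(c, n)] d = (d, 1) :: (c, n) :: [] by simp [altStep, hb2]]
      rw [foldl_altStep_cons t' (d, 1) [(c, n)]]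
      rw [List.dropWhile_cons_of_neg (by simp [hb]), List.takeWhile_cons_of_neg (by simp [hb])]
      simp [altStep]

-- in a sorted list, c does not reappear after the leading block of c's
theorem not_mem_dropWhile_sorted : ∀ (t : List Char) (c : Char), t.Pairwise (· ≤ ·) →
    (∀ x ∈ t, c ≤ x) → c ∉ t.dropWhile (· == c)
  | [], _, _, _ => by simp
  | d :: t', c, ht, hct => by
    by_cases h : d = c
    · rw [List.dropWhile_cons_of_pos (by simp [h])]
      exact not_mem_dropWhile_sorted t' c ht.of_cons (fun x hx => hct x (List.mem_cons_of_mem _ hx))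
    · rw [List.dropWhile_cons_of_neg (by simpa using h)]
      intro hmem
      have hcd : c < d := lt_of_le_of_ne (hct d (List.mem_cons_self)) (fun e => h e.symm)
      rcases List.mem_cons.mp hmem with e | hmem'
      · exact h e.symm
      · exact absurd ((List.pairwise_cons.mp ht).1 c hmem') (not_le_of_gt hcd)

-- run lengths of a sorted list = per-distinct-value counts, as a multiset
theorem runs_perm_counts : ∀ (s : List Char), s.Pairwise (· ≤ ·) →
    ((s.foldl altStep []).map Prod.snd).Perm
      ((PySem.Set.ofList s).map (fun card => ((s.filter (fun x => x == card)).length : Int)))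
  | [], _ => by simp [PySem.Set.ofList]
  | c :: t, hs => by
    have ht : t.Pairwise (· ≤ ·) := hs.of_cons
    have hct : ∀ x ∈ t, c ≤ x := (List.pairwise_cons.mp hs).1
    have hsame : ∀ x ∈ t.takeWhile (· == c), x = c :=
      fun x hx => by simpa using List.mem_takeWhile_imp hx
    have hrest_sub : (t.dropWhile (· == c)).Sublist t := List.dropWhile_sublist _
    have hrest : (t.dropWhile (· == c)).Pairwise (· ≤ ·) := ht.sublist hrest_sub
    have hcrest : c ∉ t.dropWhile (· == c) := not_mem_dropWhile_sorted t c ht hct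
    have hsplit : t.takeWhile (· == c) ++ t.dropWhile (· == c) = t :=
      List.takeWhile_append_dropWhile
    have IH := runs_perm_counts (t.dropWhile (· == c)) hrest
    -- decompose the fold
    have hfold : (c :: t).foldl altStep []
        = (t.dropWhile (· == c)).foldl altStep []
            ++ [(c, 1 + (((t.takeWhile (· == c)).length : Int)))] := by
      simpa [altStep] using foldl_altStep_block t c 1
    -- count of c in the whole list
    have hcnt_c : (((c :: t).filter (fun x => x == c)).length : Int)
        = 1 + (((t.takeWhile (· == c)).length : Int)) := by
      have : t.filter (fun x => x == c) = t.takeWhile (· == c) := by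
        conv_lhs => rw [← hsplit]
        rw [List.filter_append]
        have h1 : (t.takeWhile (· == c)).filter (fun x => x == c) = t.takeWhile (· == c) :=
          List.filter_eq_self.mpr (fun x hx => by simp [hsame x hx])
        have h2 : (t.dropWhile (· == c)).filter (fun x => x == c) = [] :=
          List.filter_eq_nil_iff.mpr (fun x hx => by
            simp only [beq_iff_eq]
            intro e; exact hcrest (e ▸ hx))
        rw [h1, h2, List.append_nil]
      rw [List.filter_cons_of_pos (by simp), this]
      simp only [List.length_cons]
      push_cast
      ring
    -- count of x ≠ c is unchanged by removing the leading block
    have hcnt_x : ∀ x ∈ PySem.Set.ofList (t.dropWhile (· == c)),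
        (((c :: t).filter (fun y => y == x)).length : Int)
          = (((t.dropWhile (· == c)).filter (fun y => y == x)).length : Int) := by
      intro x hx
      have hxr : x ∈ t.dropWhile (· == c) := (PySem.Set.mem_ofList _ _).mp hx
      have hxc : x ≠ c := fun e => hcrest (e ▸ hxr)
      have hfc : (c == x) = false := by simpa using Ne.symm hxc
      congr 2
      conv_lhs => rw [← hsplit]
      rw [List.filter_cons, List.filter_append]
      have h1 : (t.takeWhile (· == c)).filter (fun y => y == x) = [] :=
        List.filter_eq_nil_iff.mpr (fun y hy => by
          simp only [hsame y hy, beq_iff_eq]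
          exact Ne.symm hxc)
      simp [hfc, h1]
    -- the distinct values of c :: t are c plus those of the rest
    have hset : (PySem.Set.ofList (c :: t)).Perm (c :: PySem.Set.ofList (t.dropWhile (· == c))) := by
      rw [List.perm_ext_iff_of_nodup (PySem.Set.nodup_ofList _)
        (by
          refine List.nodup_cons.mpr ⟨?_, PySem.Set.nodup_ofList _⟩
          rw [PySem.Set.mem_ofList]; exact hcrest)]
      intro a
      rw [PySem.Set.mem_ofList, List.mem_cons, List.mem_cons, PySem.Set.mem_ofList]
      constructor
      · rintro (e | hat)
        · exact Or.inl e
        · rcases (by rw [← hsplit] at hat; exact List.mem_append.mp hat) with h' | h'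
          · exact Or.inl (hsame a h')
          · exact Or.inr h'
      · rintro (e | har)
        · exact Or.inl e
        · exact Or.inr (by rw [← hsplit]; exact List.mem_append_right _ har)
    -- assemble
    rw [hfold, List.map_append]
    refine (List.perm_append_singleton _ _).trans ?_
    refine List.Perm.trans ?_ ((hset.map _).symm)
    rw [List.map_cons, hcnt_c]
    refine List.Perm.cons _ ?_
    refine IH.trans ?_
    exact List.Perm.of_eq (List.map_congr_left (fun x hx => (hcnt_x x hx).symm))
termination_by s _ => s.length
decreasing_by
  simp only [List.length_cons]
  exact Nat.lt_succ_of_le ((List.dropWhile_sublist _).length_le)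

-- the two joker counts agree
theorem joker_count (l : List Char) :
    (((l.filter (fun x => x == 'J')).length : Int))
      = (l.length : Int) - ((l.filter (fun x => x != 'J')).length : Int) := by
  have h : l.length = (l.filter (fun x => x == 'J')).length
      + (l.filter (fun x => !(x == 'J'))).length := by
    simpa using List.length_eq_length_filter_add (l := l) (fun x : Char => x == 'J')
  have he : l.filter (fun x => x != 'J') = l.filter (fun x => !(x == 'J')) := by
    apply List.filter_congr; intro x _; simp [bne]
  rw [he]
  omega

-- ===== VERDICT (by name: the statement is the Claim_ definition above) =====
theorem get_groups_2_spec : Claim_equal_get_groups_2 := by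
  intro cards _
  unfold Spec_get_groups_2 get_groups_2 get_groups_2_alt get_groups_1
  have hs := PySem.List.sorted_pairwise (cards.toList.filter (fun c => c != 'J')) (fun x => x)
  have hperm := runs_perm_counts (PySem.List.sorted (cards.toList.filter (fun c => c != 'J')) (fun x => x) false) hs
  have hgroups := revSortDet _ _ hperm.symm
  have hjok := joker_count cards.toList
  have hlen := PySem.List.length_sorted (cards.toList.filter (fun c => c != 'J')) (fun x => x) false
  simp only [hgroups, hjok, hlen]
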